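-- pv_equiv track=rewrite | github.com/shruti-parikh/elective_4_cp | 11-ismostlymagicsquare-Python/ismostlymagicsquare.py | ismostlymagicsquare
-- ===== SOURCE A (Python) =====
-- def ismostlymagicsquare(a):
-- 	n = len(a)
-- 	if n==1:
-- 		return True
-- 	d1 = 0
-- 	d2 = 0
-- 	for i in range(n):
-- 		d1 += a[i][i]
-- 		d2 += a[i][n-i-1]
-- 	srow = 0
-- 	scol = 0
-- 	for i in range(n):
-- 		for j in range(n):
-- 			srow += a[i][j]
-- 			scol += a[j][i]
-- 	if srow == scol == d1 == d2:
-- 		return True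
-- 	else:
-- 		return False
-- ===== SOURCE B (Python) =====
-- def ismostlymagicsquare(a):
--     n = len(a)
--     flat = []
--     rflat = []
--     for row in a:
--         flat += row[:n]
--         rflat += row[:n][::-1]
--     return sum(flat) == sum(flat[::n + 1]) == sum(rflat[::n + 1])
-- ===== Notes on version B (the rewrite author's own statement) =====
-- stated objective: alternative
-- what changed: Instead of A's diagonal index loop plus a nested double loop accumulating the grand total twice, B flattens the (row-truncated) matrix into one list and its row-reversed counterpart and reads the two diagonals as stride slices flat[::n+1] and rflat[::n+1], comparing their sums with the flat total.
import Mathlib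
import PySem

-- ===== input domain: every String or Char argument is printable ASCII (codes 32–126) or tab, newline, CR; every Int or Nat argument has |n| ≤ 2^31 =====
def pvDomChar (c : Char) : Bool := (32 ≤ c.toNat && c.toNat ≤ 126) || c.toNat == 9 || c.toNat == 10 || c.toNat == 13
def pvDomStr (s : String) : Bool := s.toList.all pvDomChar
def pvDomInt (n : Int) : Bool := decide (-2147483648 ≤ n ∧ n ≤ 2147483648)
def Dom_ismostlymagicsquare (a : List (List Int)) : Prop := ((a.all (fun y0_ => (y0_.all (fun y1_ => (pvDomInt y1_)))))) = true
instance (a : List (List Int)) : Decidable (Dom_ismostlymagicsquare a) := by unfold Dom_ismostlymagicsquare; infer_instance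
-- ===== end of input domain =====

-- B flattens the square into one list and reads the two diagonals as stride
-- slices (flat[::n+1] of the flattening and of the row-reversed flattening)
-- instead of A's index loops (objective: alternative).

-- ===== PORT A =====
def ismostlymagicsquare (a : List (List Int)) : Bool :=
  let n : Int := a.length
  if n = 1 then true
  else
    let d := (PySem.List.pyRange 0 n 1).foldl
      (fun (p : Int × Int) i =>
        (p.1 + PySem.List.pyGetD (PySem.List.pyGetD a i []) i 0,
         p.2 + PySem.List.pyGetD (PySem.List.pyGetD a i []) (n - i - 1) 0)) (0, 0)
    let s := (PySem.List.pyRange 0 n 1).foldl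
      (fun (p : Int × Int) i =>
        (PySem.List.pyRange 0 n 1).foldl
          (fun (q : Int × Int) j =>
            (q.1 + PySem.List.pyGetD (PySem.List.pyGetD a i []) j 0,
             q.2 + PySem.List.pyGetD (PySem.List.pyGetD a j []) i 0)) p) (0, 0)
    decide (s.1 = s.2 ∧ s.2 = d.1 ∧ d.1 = d.2)

-- ===== PORT B =====
-- The stride slices have steps -1 and n+1, never 0, so Python never raises on
-- them and `.getD []` after `slice?` is exact (slice? is `some` for step ≠ 0).
def ismostlymagicsquare_alt (a : List (List Int)) : Bool :=
  let n : Int := a.length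
  let p := a.foldl
    (fun (p : List Int × List Int) row =>
      (p.1 ++ PySem.List.slice row none (some n),
       p.2 ++ (PySem.List.slice? (PySem.List.slice row none (some n)) none none (-1)).getD []))
    ([], [])
  let s1 := (PySem.List.slice? p.1 none none (n + 1)).getD []
  let s2 := (PySem.List.slice? p.2 none none (n + 1)).getD []
  decide (p.1.sum = s1.sum ∧ s1.sum = s2.sum)

-- ===== PRECONDITION & SPEC =====
-- Pre_ excludes ragged matrices with 2 ≤ len(a) and a row shorter than len(a):
-- exactly there A's indexing raises IndexError (for len(a) = 1 A returns before
-- indexing, so every single-row input is admitted).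
def Pre_ismostlymagicsquare (a : List (List Int)) : Prop :=
  a.length = 1 ∨ ∀ r ∈ a, a.length ≤ r.length
instance (a : List (List Int)) : Decidable (Pre_ismostlymagicsquare a) := by
  unfold Pre_ismostlymagicsquare; infer_instance
def pvWitness_ismostlymagicsquare : List (List Int) := [[2, 7], [9, 5]]

def Spec_ismostlymagicsquare (a : List (List Int)) (out : Bool) : Prop := out = ismostlymagicsquare_alt a
instance (a : List (List Int)) (out : Bool) : Decidable (Spec_ismostlymagicsquare a out) := by unfold Spec_ismostlymagicsquare; infer_instance

-- ===== CLAIM (what is proved, stated in full; the proofs are below) =====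
def Claim_equal_ismostlymagicsquare : Prop := ∀ (a : List (List Int)), Dom_ismostlymagicsquare a → Pre_ismostlymagicsquare a → Spec_ismostlymagicsquare a (ismostlymagicsquare a)

-- ===== LEMMAS AND PROOFS =====

-- cell a[i][j] with Nat indices; the three accumulated sums, written over List.range
def pvG (a : List (List Int)) (i j : Nat) : Int := (a.getD i []).getD j 0
def pvD1 (a : List (List Int)) : Int :=
  ((List.range a.length).map (fun k => pvG a k k)).sum
def pvD2 (a : List (List Int)) : Int :=
  ((List.range a.length).map (fun k => pvG a k (a.length - 1 - k))).sum
def pvT (a : List (List Int)) : Int :=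
  ((List.range a.length).map (fun k => ((List.range a.length).map (fun j => pvG a k j)).sum)).sum

lemma foldl_pair (l : List Int) (F G : Int → Int) (x y : Int) :
    l.foldl (fun (p : Int × Int) i => (p.1 + F i, p.2 + G i)) (x, y)
      = (x + (l.map F).sum, y + (l.map G).sum) := by
  induction l generalizing x y with
  | nil => simp
  | cons h t ih => simp [ih]; constructor <;> ring

lemma foldl_congr' {α β : Type} (l : List α) (f g : β → α → β) (init : β)
    (h : ∀ acc x, f acc x = g acc x) : l.foldl f init = l.foldl g init := by
  induction l generalizing init with
  | nil => rfl
  | cons hd t ih => simp only [List.foldl_cons, h]; exact ih _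

lemma sum_swap {α β : Type} (l1 : List α) (l2 : List β) (f : α → β → Int) :
    (l1.map (fun i => (l2.map (fun j => f i j)).sum)).sum
      = (l2.map (fun j => (l1.map (fun i => f i j)).sum)).sum := by
  induction l1 with
  | nil => simp
  | cons h t ih => simp [List.sum_map_add, ih]

-- A's value when n ≠ 1, as sums over List.range
lemma A_char (a : List (List Int)) (hn : (a.length : Int) ≠ 1) :
    ismostlymagicsquare a = decide (pvT a = pvD1 a ∧ pvD1 a = pvD2 a) := by
  simp only [ismostlymagicsquare, if_neg hn]
  rw [foldl_congr' (PySem.List.pyRange 0 (a.length : Int) 1) _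
        (fun (p : Int × Int) i =>
          (p.1 + ((PySem.List.pyRange 0 (a.length : Int) 1).map
              (fun j => PySem.List.pyGetD (PySem.List.pyGetD a i []) j 0)).sum,
           p.2 + ((PySem.List.pyRange 0 (a.length : Int) 1).map
              (fun j => PySem.List.pyGetD (PySem.List.pyGetD a j []) i 0)).sum))
        ((0 : Int), (0 : Int))
        (fun acc x => by rcases acc with ⟨u, v⟩; rw [foldl_pair]),
      foldl_pair, foldl_pair]
  simp only [PySem.List.pyRange_zero_nat, List.map_map, Function.comp_def,
    PySem.List.pyGetD_natCast]
  have hsw :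
      ((List.range a.length).map (fun k =>
          ((List.range a.length).map (fun j => (a.getD j []).getD k 0)).sum)).sum
        = pvT a := by
    rw [← sum_swap (List.range a.length) (List.range a.length)
          (fun j k => (a.getD j []).getD k 0)]
    rfl
  have hd2 :
      ((List.range a.length).map (fun k =>
          PySem.List.pyGetD (a.getD k []) ((a.length : Int) - (k : Int) - 1) 0)).sum
        = pvD2 a := by
    unfold pvD2
    congr 1
    apply List.map_congr_left
    intro k hk
    simp at hk
    have : ((a.length : Int) - (k : Int) - 1) = ((a.length - 1 - k : Nat) : Int) := by omega
    rw [this, PySem.List.pyGetD_natCast]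
    rfl
  simp only [hsw, hd2]
  simp only [pvT, pvD1, pvG]
  simp

lemma range_map_getD (row : List Int) (n : Nat) (h : n ≤ row.length) :
    (List.range n).map (fun j => row.getD j 0) = row.take n := by
  apply List.ext_getElem
  · simp [h]
  · intro k h1 h2
    simp at h1
    simp [List.getElem?_eq_getElem (show k < row.length by omega)]

lemma map_eq_range_getD (a : List (List Int)) (g : List Int → Int) :
    a.map g = (List.range a.length).map (fun k => g (a.getD k [])) := by
  apply List.ext_getElem
  · simp
  · intro k h1 h2
    simp at h1
    simp [List.getElem?_eq_getElem h1]

lemma filterMap_all_some {α β : Type} (l : List α) (f : α → Option β) (g : α → β)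
    (h : ∀ x ∈ l, f x = some (g x)) : l.filterMap f = l.map g := by
  induction l with
  | nil => rfl
  | cons x t ih =>
    simp only [List.filterMap_cons, h x (by simp), List.map_cons]
    rw [ih (fun y hy => h y (by simp [hy]))]

lemma flatten_get (L : List (List Int)) (n : Nat) (hn : ∀ r ∈ L, r.length = n)
    (k j : Nat) (hk : k < L.length) (hj : j < n) :
    L.flatten[(k * n + j)]? = some ((L.getD k []).getD j 0) := by
  induction L generalizing k with
  | nil => simp at hk
  | cons r t ih =>
    have hr : r.length = n := hn r (by simp)
    have hjr : j < r.length := by rw [hr]; exact hj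
    cases k with
    | zero =>
      simp only [List.flatten_cons, Nat.zero_mul, Nat.zero_add]
      rw [List.getElem?_append_left hjr]
      simp [List.getElem?_eq_getElem hjr]
    | succ k =>
      simp only [List.flatten_cons]
      have hidx : (k + 1) * n + j = r.length + (k * n + j) := by rw [hr]; ring
      rw [hidx, List.getElem?_append_right (by omega)]
      simp only [Nat.add_sub_cancel_left]
      have := ih (fun s hs => hn s (by simp [hs])) k (by simpa using hk)
      simpa using this

lemma sum_strided (L : List (List Int)) (hsq : ∀ r ∈ L, r.length = L.length) :
    (((PySem.List.slice? L.flatten none none ((L.length : Int) + 1)).getD []).sum)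
      = ((List.range L.length).map (fun k => (L.getD k []).getD k 0)).sum := by
  rcases L with _ | ⟨r0, t⟩
  · rfl
  · have hflatlen : (r0 :: t).flatten.length = (r0 :: t).length * (r0 :: t).length := by
      rw [List.length_flatten]
      have h2 : (r0 :: t).map List.length = List.replicate (r0 :: t).length (r0 :: t).length := by
        apply List.ext_getElem
        · simp
        · intro k h1 h2
          simp only [List.getElem_map, List.getElem_replicate]
          exact hsq _ (List.getElem_mem _)
      rw [h2, List.sum_replicate, smul_eq_mul]
    generalize hL : (r0 :: t) = L at *
    have hlen : 0 < L.length := by rw [← hL]; simp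
    simp only [PySem.List.slice?, PySem.List.sliceIndices,
      if_neg (show ¬ ((L.length:Int) + 1 = 0) by omega),
      if_neg (show ¬ ((L.length:Int) + 1 < 0) by omega),
      if_pos (show (0:Int) < (L.length:Int)+1 by omega)]
    simp only [hflatlen, Option.getD_some]
    rw [if_pos (show (0:Int) < ((L.length * L.length : Nat) : Int) by
      have := Nat.mul_pos hlen hlen; exact_mod_cast this)]
    have hcount : ((((L.length * L.length : Nat) : Int) - 0 + ((L.length:Int) + 1) - 1) / ((L.length:Int) + 1)).toNat = L.length := by
      have hnum : (((L.length * L.length : Nat) : Int) - 0 + ((L.length:Int) + 1) - 1)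
          = (L.length : Int) * ((L.length : Int) + 1) := by push_cast; ring
      rw [hnum, Int.mul_ediv_cancel _ (by omega)]
      simp
    rw [hcount]
    congr 1
    apply filterMap_all_some
    intro k hk
    simp only [List.mem_range] at hk
    have hidx : ((0:Int) + ((L.length:Int)+1) * (k:Int)) = ((k * L.length + k : Nat) : Int) := by
      push_cast; ring
    rw [hidx, Int.toNat_natCast]
    exact flatten_get L L.length hsq k k hk hk

lemma B_char (a : List (List Int)) (hp : ∀ r ∈ a, a.length ≤ r.length) :
    ismostlymagicsquare_alt a = decide (pvT a = pvD1 a ∧ pvD1 a = pvD2 a) := by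
  have hget : ∀ k, k < a.length → a.getD k [] ∈ a := by
    intro k hk
    rw [List.getD_eq_getElem a [] hk]
    exact List.getElem_mem hk
  simp only [ismostlymagicsquare_alt]
  rw [PySem.List.foldl_prod_mk
        (f := fun (acc : List Int) row => acc ++ PySem.List.slice row none (some (a.length : Int)))
        (g := fun (acc : List Int) row =>
          acc ++ (PySem.List.slice? (PySem.List.slice row none (some (a.length : Int))) none none (-1)).getD []),
      PySem.List.foldl_append_eq_flatMap, PySem.List.foldl_append_eq_flatMap]
  simp only [List.nil_append]
  have hrchunk : ∀ row : List Int,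
      (PySem.List.slice? (PySem.List.slice row none (some (a.length : Int))) none none (-1)).getD []
        = (row.take a.length).reverse := by
    intro row
    rw [PySem.List.slice_to_natCast, PySem.List.slice?_none_none_neg_one, Option.getD_some]
  simp only [hrchunk]
  simp only [PySem.List.slice_to_natCast]
  rw [show a.flatMap (fun row => row.take a.length)
        = (a.map (fun row => row.take a.length)).flatten from List.flatMap_def ..,
      show a.flatMap (fun row => (row.take a.length).reverse)
        = (a.map (fun row => (row.take a.length).reverse)).flatten from List.flatMap_def ..]
  have hlen1 : (a.map (fun row => row.take a.length)).length = a.length := by simp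
  have hlen2 : (a.map (fun row => (row.take a.length).reverse)).length = a.length := by simp
  have hs1 := sum_strided (a.map (fun row => row.take a.length)) (by
    intro r hr
    rw [hlen1]
    simp only [List.mem_map] at hr
    obtain ⟨row, hrow, rfl⟩ := hr
    simp [Nat.min_eq_left (hp row hrow)])
  have hs2 := sum_strided (a.map (fun row => (row.take a.length).reverse)) (by
    intro r hr
    rw [hlen2]
    simp only [List.mem_map] at hr
    obtain ⟨row, hrow, rfl⟩ := hr
    simp [Nat.min_eq_left (hp row hrow)])
  rw [hlen1] at hs1
  rw [hlen2] at hs2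
  rw [hs1, hs2]
  have hT : ((a.map (fun row => row.take a.length)).flatten).sum = pvT a := by
    rw [List.sum_flatten, List.map_map,
        map_eq_range_getD a (fun row => (List.sum ∘ fun row => row.take a.length) row)]
    unfold pvT
    congr 1
    apply List.map_congr_left
    intro k hk
    simp only [List.mem_range] at hk
    simp only [Function.comp]
    rw [show ((List.range a.length).map (fun j => pvG a k j))
          = (List.range a.length).map (fun j => (a.getD k []).getD j 0) from rfl,
        range_map_getD _ _ (hp _ (hget k hk))]
  have hD1 : ((List.range a.length).map
      (fun k => ((a.map (fun row => row.take a.length)).getD k []).getD k 0)).sum = pvD1 a := by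
    unfold pvD1
    congr 1
    apply List.map_congr_left
    intro k hk
    simp only [List.mem_range] at hk
    have h1 : (a.map (fun row => row.take a.length)).getD k [] = (a.getD k []).take a.length := by
      rw [List.getD_eq_getElem _ [] (by simpa using hk), List.getElem_map,
          List.getD_eq_getElem a [] hk]
    rw [h1, List.getD_eq_getElem?_getD, List.getElem?_take_of_lt hk,
        ← List.getD_eq_getElem?_getD]
    rfl
  have hD2 : ((List.range a.length).map
      (fun k => ((a.map (fun row => (row.take a.length).reverse)).getD k []).getD k 0)).sum = pvD2 a := by
    unfold pvD2
    congr 1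
    apply List.map_congr_left
    intro k hk
    simp only [List.mem_range] at hk
    have hrl := hp _ (hget k hk)
    have h1 : (a.map (fun row => (row.take a.length).reverse)).getD k []
        = ((a.getD k []).take a.length).reverse := by
      rw [List.getD_eq_getElem _ [] (by simpa using hk), List.getElem_map,
          List.getD_eq_getElem a [] hk]
    rw [h1, List.getD_eq_getElem?_getD,
        List.getElem?_reverse (by rw [List.length_take]; omega),
        List.length_take, Nat.min_eq_left hrl,
        List.getElem?_take_of_lt (by omega), ← List.getD_eq_getElem?_getD]
    rfl
  rw [hT, hD1, hD2]

-- ===== VERDICT (by name: the statement is the Claim_ definition above) =====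
theorem ismostlymagicsquare_spec : Claim_equal_ismostlymagicsquare := by
  intro a _ hp
  unfold Spec_ismostlymagicsquare
  by_cases hsq : ∀ r ∈ a, a.length ≤ r.length
  · rw [B_char a hsq]
    by_cases hn : (a.length : Int) = 1
    · have hn' : a.length = 1 := by exact_mod_cast hn
      simp only [ismostlymagicsquare, hn]
      have h3 : pvT a = pvD1 a ∧ pvD1 a = pvD2 a := by
        simp [pvT, pvD1, pvD2, hn', List.range_one]
      simp [h3]
    · rw [A_char a hn]
  · -- then Pre_ forces len = 1 with its only row shorter than 1, i.e. a = [[]]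
    have h1 : a.length = 1 := by
      rcases hp with h | h
      · exact h
      · exact absurd h hsq
    have ha : a = [[]] := by
      rcases a with _ | ⟨r, t⟩
      · simp at h1
      · have ht : t = [] := by
          cases t
          · rfl
          · simp at h1
        subst ht
        rcases r with _ | ⟨x, r'⟩
        · rfl
        · exfalso; apply hsq; intro s hs; simp at hs; subst hs; simp
    subst ha
    decide
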